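-- pv_equiv track=rewrite | github.com/schaerphix/renamer | Renamer.py | GetFolder
-- ===== SOURCE A (Python) =====
-- def GetFolder(filePath,i):
--     folder = filePath[i].split('/')
--     folderPath =""
--     a = 0
--     while a < (len(folder)-1) :
--         folderPath = folderPath + folder [a] + "/"
--         a += 1
--     return folderPath
-- ===== SOURCE B (Python) =====
-- def GetFolder(filePath, i):
--     path = filePath[i]
--     return path[:path.rfind('/') + 1]
-- ===== Notes on version B (the rewrite author's own statement) =====
-- stated objective: idiomatic
-- what changed: Replaces split('/') plus an index-driven while loop that re-concatenates the pieces with a single rfind for the last '/' and one slice keeping everything through it.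
import Mathlib
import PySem

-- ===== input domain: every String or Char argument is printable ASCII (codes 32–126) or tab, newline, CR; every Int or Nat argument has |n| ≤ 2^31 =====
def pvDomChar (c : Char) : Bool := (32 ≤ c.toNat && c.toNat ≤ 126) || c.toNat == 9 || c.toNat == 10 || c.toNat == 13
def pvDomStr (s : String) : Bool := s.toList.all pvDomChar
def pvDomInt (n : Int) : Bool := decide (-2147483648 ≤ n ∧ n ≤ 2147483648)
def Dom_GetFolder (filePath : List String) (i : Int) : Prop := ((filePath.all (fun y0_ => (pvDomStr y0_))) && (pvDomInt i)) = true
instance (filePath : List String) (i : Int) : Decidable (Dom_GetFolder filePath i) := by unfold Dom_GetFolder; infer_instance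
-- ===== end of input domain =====

-- B replaces A's split('/') + index-loop re-concatenation by rfind of the last '/' and one slice (idiomatic).


-- ===== PORT A =====
-- the while loop: 'while a < len(folder)-1: folderPath += folder[a] + "/"; a += 1', fuel = iterations left
def GetFolderLoop (folder : List String) (a : Nat) (fuel : Nat) (folderPath : String) : String :=
  match fuel with
  | 0 => folderPath
  | fuel' + 1 =>
      GetFolderLoop folder (a + 1) fuel' (folderPath ++ PySem.List.pyGetD folder (a : Int) "" ++ "/")

def GetFolder (filePath : List String) (i : Int) : String :=
  let folder := (PySem.Str.split? ((PySem.List.pyGet? filePath i).getD "") "/").getD []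
  GetFolderLoop folder 0 (folder.length - 1) ""

-- ===== PORT B =====
def GetFolder_alt (filePath : List String) (i : Int) : String :=
  let path := (PySem.List.pyGet? filePath i).getD ""
  PySem.Str.slice path none (some (PySem.Str.rfind path "/" + 1))

-- ===== PRECONDITION & SPEC =====
-- Pre_ excludes exactly the indices i on which 'filePath[i]' raises IndexError in A (and in B).
def Pre_GetFolder (filePath : List String) (i : Int) : Prop :=
  PySem.Raise.InRange filePath.length i
instance (filePath : List String) (i : Int) : Decidable (Pre_GetFolder filePath i) := by
  unfold Pre_GetFolder; infer_instance

def pvWitness_GetFolder : List String × Int := (["ab/cd/e.txt"], 0)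

def Spec_GetFolder (filePath : List String) (i : Int) (out : String) : Prop := out = GetFolder_alt filePath i
instance (filePath : List String) (i : Int) (out : String) : Decidable (Spec_GetFolder filePath i out) := by unfold Spec_GetFolder; infer_instance

-- ===== CLAIM (what is proved, stated in full; the proofs are below) =====
def Claim_equal_GetFolder : Prop := ∀ (filePath : List String) (i : Int), Dom_GetFolder filePath i → Pre_GetFolder filePath i → Spec_GetFolder filePath i (GetFolder filePath i)

-- ===== LEMMAS AND PROOFS =====

-- S cs = Python's cs.split('/') on char lists, by structural recursion from the front
def pvS (cs : List Char) : List (List Char) :=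
  match cs with
  | [] => [[]]
  | c :: rest => if c = '/' then [] :: pvS rest else (pvS rest).modifyHead (c :: ·)

theorem pvS_ne_nil (cs : List Char) : pvS cs ≠ [] := by
  cases cs with
  | nil => simp [pvS]
  | cons c rest =>
      simp only [pvS]
      split
      · simp
      · cases h : pvS rest with
        | nil => exact absurd h (pvS_ne_nil rest)
        | cons a l => simp [List.modifyHead]

theorem pvS_length_one_iff (cs : List Char) : (pvS cs).length = 1 ↔ '/' ∉ cs := by
  induction cs with
  | nil => simp [pvS]
  | cons c rest ih =>
      simp only [pvS]
      by_cases hc : c = '/'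
      · subst hc
        simp only [if_pos rfl]
        constructor
        · intro h; exact absurd (by simpa using h) (pvS_ne_nil rest)
        · intro h; exact absurd (by simp : '/' ∈ '/' :: rest) h
      · simp only [if_neg hc, List.length_modifyHead, List.mem_cons]
        rw [ih]
        constructor
        · intro h hmem
          rcases hmem with h1 | h2
          · exact hc h1.symm
          · exact h h2
        · intro h
          exact fun hmem => h (Or.inr hmem)

-- splitOn.go computes pvS (fuel ≥ remaining length)
theorem pvSplitGo_eq (fuel : Nat) :
    ∀ (l cur : List Char) (acc : List (List Char)), l.length ≤ fuel →
      PySem.Chars.splitOn.go ['/'] fuel l cur acc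
        = acc.reverse ++ (pvS l).modifyHead (cur.reverse ++ ·) := by
  induction fuel with
  | zero =>
      intro l cur acc h
      have hl : l = [] := List.length_eq_zero_iff.mp (Nat.le_zero.mp h)
      subst hl
      simp [PySem.Chars.splitOn.go, pvS, List.modifyHead]
  | succ fuel ih =>
      intro l cur acc h
      cases l with
      | nil => simp [PySem.Chars.splitOn.go, pvS, List.modifyHead]
      | cons c rest =>
          simp only [PySem.Chars.splitOn.go]
          by_cases hc : c = '/'
          · subst hc
            have hpre : ['/'].isPrefixOf ('/' :: rest) = true := by simp [List.isPrefixOf]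
            rw [if_pos hpre]
            have : List.drop (['/'] : List Char).length ('/' :: rest) = rest := by simp
            rw [this, ih rest [] _ (by simpa using Nat.le_of_succ_le_succ h)]
            simp only [pvS, List.reverse_cons, List.reverse_nil, List.nil_append,
              List.modifyHead, List.append_assoc]
            cases pvS rest <;> simp
          · have hne : ¬ ('/' : Char) = c := fun hh => hc hh.symm
            rw [if_neg (by simpa using hne)]
            rw [ih rest (c :: cur) acc (by simpa using Nat.le_of_succ_le_succ h)]
            simp only [pvS, if_neg hc]
            congr 1
            cases hS : pvS rest with
            | nil => exact absurd hS (pvS_ne_nil rest)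
            | cons a t => simp [List.modifyHead]

theorem pvSplitOn_eq (cs : List Char) : PySem.Chars.splitOn cs ['/'] = pvS cs := by
  unfold PySem.Chars.splitOn
  rw [pvSplitGo_eq (cs.length + 1) cs [] [] (by omega)]
  cases hS : pvS cs with
  | nil => exact absurd hS (pvS_ne_nil cs)
  | cons a t => simp [List.modifyHead]

-- the loop, read on char lists
theorem pvLoop_toList (folder : List String) :
    ∀ (fuel a : Nat) (acc : String), a + fuel ≤ folder.length →
      (GetFolderLoop folder a fuel acc).toList
        = acc.toList ++ (((folder.drop a).take fuel).map (fun p => p.toList ++ ['/'])).flatten := by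
  intro fuel
  induction fuel with
  | zero => intro a acc _; simp [GetFolderLoop]
  | succ fuel ih =>
      intro a acc h
      have ha : a < folder.length := by omega
      simp only [GetFolderLoop]
      rw [ih (a + 1) _ (by omega)]
      have hget : PySem.List.pyGetD folder (a : Int) "" = folder[a] := by
        rw [PySem.List.pyGetD_natCast]
        simp [List.getD, ha]
      have hdrop : folder.drop a = folder[a] :: folder.drop (a + 1) :=
        List.drop_eq_getElem_cons ha
      rw [hdrop, List.take_succ_cons, List.map_cons, List.flatten_cons]
      simp only [String.toList_append, hget, List.append_assoc]
      rfl

-- target shape: the prefix of cs up to and including the last '/'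
def pvF (cs : List Char) : List Char :=
  match cs with
  | [] => []
  | c :: rest => if '/' ∈ rest then c :: pvF rest else if c = '/' then ['/'] else []

-- A side on chars equals pvF
theorem pvA_eq_pvF (cs : List Char) :
    (((pvS cs).dropLast).map (fun p => p ++ ['/'])).flatten = pvF cs := by
  induction cs with
  | nil => simp [pvS, pvF]
  | cons c rest ih =>
      obtain ⟨h0, t0, hS⟩ : ∃ h t, pvS rest = h :: t := by
        cases hS : pvS rest with
        | nil => exact absurd hS (pvS_ne_nil rest)
        | cons a l => exact ⟨a, l, rfl⟩
      rw [hS] at ih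
      by_cases hc : c = '/'
      · subst hc
        have hSc : pvS ('/' :: rest) = [] :: h0 :: t0 := by rw [pvS, if_pos rfl, hS]
        have hFc : pvF ('/' :: rest) = if '/' ∈ rest then '/' :: pvF rest else ['/'] := by
          rw [pvF]; split_ifs with h1 h2 <;> first | rfl | exact absurd rfl h2
        rw [hSc, hFc]
        by_cases hm : '/' ∈ rest
        · rw [if_pos hm]
          have ht : t0 ≠ [] := by
            rintro rfl
            exact (pvS_length_one_iff rest).mp (by rw [hS]; rfl) hm
          obtain ⟨b, t', rfl⟩ := List.exists_cons_of_ne_nil ht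
          rw [List.dropLast_cons_of_ne_nil (by simp : (h0 :: b :: t' : List (List Char)) ≠ []),
            List.map_cons, List.flatten_cons, ← ih]
          simp
        · rw [if_neg hm]
          have ht : t0 = [] := by
            have h1 : (pvS rest).length = 1 := (pvS_length_one_iff rest).mpr hm
            rw [hS] at h1; simpa using h1
          subst ht
          simp
      · have hSc : pvS (c :: rest) = (c :: h0) :: t0 := by
          rw [pvS, if_neg hc, hS]; rfl
        have hFc : pvF (c :: rest) = if '/' ∈ rest then c :: pvF rest else [] := by
          rw [pvF]; split_ifs with h1 h2 <;> first | rfl | exact absurd rfl h2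
        rw [hSc, hFc]
        by_cases hm : '/' ∈ rest
        · rw [if_pos hm]
          have ht : t0 ≠ [] := by
            rintro rfl
            exact (pvS_length_one_iff rest).mp (by rw [hS]; rfl) hm
          obtain ⟨b, t', rfl⟩ := List.exists_cons_of_ne_nil ht
          rw [List.dropLast_cons_of_ne_nil (by simp : (b :: t' : List (List Char)) ≠ []),
            List.map_cons, List.flatten_cons] at ih
          rw [List.dropLast_cons_of_ne_nil (by simp : (b :: t' : List (List Char)) ≠ []),
            List.map_cons, List.flatten_cons, ← ih]
          simp
        · rw [if_neg hm]
          have ht : t0 = [] := by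
            have h1 : (pvS rest).length = 1 := (pvS_length_one_iff rest).mpr hm
            rw [hS] at h1; simpa using h1
          subst ht
          simp

-- rfind basics
theorem pvRfindGo_cases (cs : List Char) (sub : List Char) (j : Nat) :
    0 ≤ PySem.Chars.rfind.go cs sub j ∨ PySem.Chars.rfind.go cs sub j = -1 := by
  induction j with
  | zero => simp only [PySem.Chars.rfind.go]; split <;> simp
  | succ j ih =>
      simp only [PySem.Chars.rfind.go]
      split
      · left; positivity
      · exact ih

theorem pvRfindGo_shift (c : Char) (cs : List Char) (j : Nat) :
    PySem.Chars.rfind.go (c :: cs) ['/'] (j + 1)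
      = if 0 ≤ PySem.Chars.rfind.go cs ['/'] j then PySem.Chars.rfind.go cs ['/'] j + 1
        else if c = '/' then 0 else -1 := by
  induction j with
  | zero =>
      simp only [PySem.Chars.rfind.go, Nat.zero_add, List.drop_succ_cons, List.drop_zero]
      by_cases hp : (['/'] : List Char).isPrefixOf cs = true
      · simp [hp]
      · have h1 : List.isPrefixOf ['/'] (c :: cs) = ('/' == c) := by
          simp [List.isPrefixOf]
        by_cases hc : c = '/'
        · subst hc; simp [hp, h1]
        · simp [hp, h1, Ne.symm hc, hc]
  | succ j ih =>
      conv_lhs => rw [PySem.Chars.rfind.go]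
      conv_rhs => rw [PySem.Chars.rfind.go]
      have hd : List.drop (j + 1 + 1) (c :: cs) = List.drop (j + 1) cs := rfl
      rw [hd]
      by_cases hp : (['/'] : List Char).isPrefixOf (List.drop (j + 1) cs) = true
      · rw [if_pos hp, if_pos hp, if_pos (by positivity)]
        push_cast; ring
      · rw [if_neg hp, if_neg hp, ih]

theorem pvRfind_cons (c : Char) (cs : List Char) :
    PySem.Chars.rfind (c :: cs) ['/']
      = if 0 ≤ PySem.Chars.rfind cs ['/'] then PySem.Chars.rfind cs ['/'] + 1
        else if c = '/' then 0 else -1 := by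
  unfold PySem.Chars.rfind
  exact pvRfindGo_shift c cs cs.length

theorem pvRfind_nil : PySem.Chars.rfind [] ['/'] = -1 := by
  unfold PySem.Chars.rfind
  simp [PySem.Chars.rfind.go, List.isPrefixOf]

theorem pvRfind_nonneg_iff (cs : List Char) : 0 ≤ PySem.Chars.rfind cs ['/'] ↔ '/' ∈ cs := by
  induction cs with
  | nil => rw [pvRfind_nil]; simp
  | cons c rest ih =>
      rw [pvRfind_cons]
      by_cases h : 0 ≤ PySem.Chars.rfind rest ['/']
      · rw [if_pos h]
        simp [ih.mp h]
        omega
      · rw [if_neg h]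
        by_cases hc : c = '/'
        · simp [hc]
        · rw [if_neg hc]
          constructor
          · intro h1; exact absurd h1 (by norm_num)
          · intro h1
            rcases List.mem_cons.mp h1 with h2 | h2
            · exact absurd h2.symm hc
            · exact absurd (ih.mpr h2) h

-- B side on chars equals pvF
theorem pvB_eq_pvF (cs : List Char) :
    cs.take (PySem.Chars.rfind cs ['/'] + 1).toNat = pvF cs := by
  induction cs with
  | nil => simp [pvF]
  | cons c rest ih =>
      rw [pvRfind_cons]
      simp only [pvF]
      by_cases hm : '/' ∈ rest
      · have h0 : 0 ≤ PySem.Chars.rfind rest ['/'] := (pvRfind_nonneg_iff rest).mpr hm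
        rw [if_pos h0, if_pos hm]
        have : (PySem.Chars.rfind rest ['/'] + 1 + 1).toNat
            = (PySem.Chars.rfind rest ['/'] + 1).toNat + 1 := by omega
        rw [this, List.take_succ_cons, ih]
      · have h0 : ¬ 0 ≤ PySem.Chars.rfind rest ['/'] :=
          fun h => hm ((pvRfind_nonneg_iff rest).mp h)
        rw [if_neg h0, if_neg hm]
        by_cases hc : c = '/'
        · subst hc; simp
        · rw [if_neg hc, if_neg hc]; simp

-- assemble: with s = filePath[i], both ports compute pvF of s's characters
theorem pvMain (filePath : List String) (i : Int) (s : String)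
    (hs : PySem.List.pyGet? filePath i = some s) :
    GetFolder filePath i = GetFolder_alt filePath i := by
  unfold GetFolder GetFolder_alt
  rw [hs]
  simp only [Option.getD_some]
  have htl : ("/" : String).toList = ['/'] := rfl
  have hsplit : PySem.Str.split? s "/" = some ((pvS s.toList).map String.ofList) := by
    unfold PySem.Str.split? PySem.Chars.split?
    rw [htl, if_neg (by simp), pvSplitOn_eq]
    rfl
  rw [hsplit]
  simp only [Option.getD_some]
  have hlen : ((pvS s.toList).map String.ofList).length = (pvS s.toList).length := by
    simp
  apply String.ext
  show (GetFolderLoop ((pvS s.toList).map String.ofList) 0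
          (((pvS s.toList).map String.ofList).length - 1) "").toList
      = (PySem.Str.slice s none (some (PySem.Str.rfind s "/" + 1))).toList
  rw [pvLoop_toList _ _ 0 "" (by rw [hlen]; omega)]
  rw [List.drop_zero, hlen]
  rw [show List.take ((pvS s.toList).length - 1) ((pvS s.toList).map String.ofList)
        = ((pvS s.toList).dropLast).map String.ofList from by
      rw [List.dropLast_eq_take]; simp]
  rw [List.map_map]
  have hcomp : ((fun p => String.toList p ++ ['/']) ∘ String.ofList)
      = fun p => p ++ ['/'] := by
    funext p
    simp [Function.comp]
  rw [hcomp, pvA_eq_pvF]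
  simp only [show ("" : String).toList = [] from rfl, List.nil_append]
  -- B side
  have hrf : PySem.Str.rfind s "/" = PySem.Chars.rfind s.toList ['/'] := by
    unfold PySem.Str.rfind
    rw [htl]
  have hk : 0 ≤ PySem.Chars.rfind s.toList ['/'] + 1 := by
    rcases pvRfindGo_cases s.toList ['/'] s.toList.length with h | h
    · unfold PySem.Chars.rfind; omega
    · unfold PySem.Chars.rfind; omega
  rw [show (PySem.Str.slice s none (some (PySem.Str.rfind s "/" + 1))).toList
        = PySem.Chars.slice s.toList none (some (PySem.Chars.rfind s.toList ['/'] + 1))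
      from by rw [← hrf]; exact PySem.Str.toList_slice s none _]
  rw [PySem.Chars.slice_eq_listSlice, PySem.List.slice_to _ hk]
  rw [pvB_eq_pvF]

-- ===== VERDICT (by name: the statement is the Claim_ definition above) =====
theorem GetFolder_spec : Claim_equal_GetFolder := by
  intro filePath i _ hpre
  unfold Spec_GetFolder
  obtain ⟨s, hs⟩ : ∃ s, PySem.List.pyGet? filePath i = some s := by
    have := (PySem.List.pyGet?_eq_none_iff (xs := filePath) (i := i))
    cases h : PySem.List.pyGet? filePath i with
    | none => exact absurd (this.mp h) (by simpa [Pre_GetFolder] using hpre)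
    | some v => exact ⟨v, rfl⟩
  exact pvMain filePath i s hs
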